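-- pv_equiv track=rewrite | github.com/tezeladata/algorithmical | Second account/Codewars/6kyu.py | is_a_valid_message
-- ===== SOURCE A (Python) =====
-- def is_a_valid_message(message):
--     i = 0
--     n = len(message)
--
--     while i < n:
--         num_str = ''
--         while i < n and message[i].isdigit():
--             num_str += message[i]
--             i += 1
--
--         if not num_str: return False
--
--         number = int(num_str)
--         substring = ''
--         while i < n and message[i].isalpha():
--             substring += message[i]
--             i += 1
--         if len(substring) != number: return False
--
--     return True
-- ===== SOURCE B (Python) =====
-- def is_a_valid_message(message):
--     # Tokenize into maximal same-class runs first, then validate the run sequence.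
--     def classify(ch):
--         return 'd' if ch.isdigit() else ('a' if ch.isalpha() else 'x')
--
--     runs = []
--     idx = 0
--     while idx < len(message):
--         cls = classify(message[idx])
--         end = idx + 1
--         while end < len(message) and classify(message[end]) == cls:
--             end += 1
--         runs.append((cls, message[idx:end]))
--         idx = end
--
--     j = 0
--     while j < len(runs):
--         cls, text = runs[j]
--         if cls != 'd':
--             return False
--         number = int(text)
--         j += 1
--         if j < len(runs) and runs[j][0] == 'a':
--             if len(runs[j][1]) != number:
--                 return False
--             j += 1
--         elif number != 0:
--             return False
--     return True
-- ===== Notes on version B (the rewrite author's own statement) =====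
-- stated objective: alternative
-- what changed: B first tokenizes the message into maximal character-class runs (digit/alpha/other) and then validates the run sequence, instead of A's single interleaved index loop that parses digits and letters while validating.
import Mathlib
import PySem

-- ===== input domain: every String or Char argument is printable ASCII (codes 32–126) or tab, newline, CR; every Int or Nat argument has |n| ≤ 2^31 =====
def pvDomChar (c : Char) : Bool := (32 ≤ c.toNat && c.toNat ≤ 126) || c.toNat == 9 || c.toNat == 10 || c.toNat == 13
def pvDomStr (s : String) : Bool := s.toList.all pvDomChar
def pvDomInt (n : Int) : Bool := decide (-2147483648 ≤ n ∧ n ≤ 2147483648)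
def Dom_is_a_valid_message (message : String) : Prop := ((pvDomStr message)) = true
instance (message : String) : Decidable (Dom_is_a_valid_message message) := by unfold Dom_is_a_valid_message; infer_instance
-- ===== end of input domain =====

-- B re-implements A by tokenizing the message into maximal character-class runs first and
-- then validating the run sequence (alternative decomposition; same observable behaviour).

-- ===== PORT A =====
-- int(num_str): in A num_str is always a nonempty digit run, so Python's int() never raises here
def pvPyInt (cs : List Char) : Int := (PySem.Int.ofChars? cs).getD 0

-- A's outer while loop over the message, the two inner character-scanning whiles as takeWhile/dropWhile
def pvLoopA (cs : List Char) : Bool :=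
  match cs with
  | [] => true
  | c :: t =>
    let ds := (c :: t).takeWhile PySem.Chars.isdigit
    let rest := (c :: t).dropWhile PySem.Chars.isdigit
    if ds.isEmpty then false
    else
      let number := pvPyInt ds
      let sub := rest.takeWhile PySem.Chars.isalpha
      let rest2 := rest.dropWhile PySem.Chars.isalpha
      if (sub.length : Int) ≠ number then false else pvLoopA rest2
termination_by cs.length
decreasing_by
  rename_i hds _hnum
  have hc : PySem.Chars.isdigit c = true := by
    by_contra hc
    have hds' : ¬ ((c :: t).takeWhile PySem.Chars.isdigit).isEmpty = true := hds
    simp [List.takeWhile_cons_of_neg hc] at hds'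
  show (((c :: t).dropWhile PySem.Chars.isdigit).dropWhile PySem.Chars.isalpha).length < (c :: t).length
  rw [List.dropWhile_cons_of_pos hc]
  have h1 := List.length_dropWhile_le PySem.Chars.isalpha (t.dropWhile PySem.Chars.isdigit)
  have h2 := List.length_dropWhile_le PySem.Chars.isdigit t
  simpa using Nat.lt_succ_of_le (le_trans h1 h2)

def is_a_valid_message (message : String) : Bool := pvLoopA message.toList

-- ===== PORT B =====
def pvClassify (c : Char) : Char :=
  if PySem.Chars.isdigit c then 'd' else if PySem.Chars.isalpha c then 'a' else 'x'

-- B's first while loop: cut the message into maximal runs of one character class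
def pvTokenize (cs : List Char) : List (Char × List Char) :=
  match cs with
  | [] => []
  | c :: t =>
    let cl := pvClassify c
    (cl, c :: t.takeWhile (fun d => pvClassify d == cl)) ::
      pvTokenize (t.dropWhile (fun d => pvClassify d == cl))
termination_by cs.length
decreasing_by
  simpa using Nat.lt_succ_of_le (List.length_dropWhile_le _ t)

-- B's second while loop: validate the run sequence
def pvWalk (runs : List (Char × List Char)) : Bool :=
  match runs with
  | [] => true
  | (cl, text) :: rest =>
    if cl ≠ 'd' then false
    else
      let number := pvPyInt text
      match rest with
      | (cl2, text2) :: rest2 =>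
        if cl2 = 'a' then
          if (text2.length : Int) ≠ number then false else pvWalk rest2
        else if number ≠ 0 then false else pvWalk ((cl2, text2) :: rest2)
      | [] => if number ≠ 0 then false else true
termination_by runs.length

def is_a_valid_message_alt (message : String) : Bool := pvWalk (pvTokenize message.toList)

-- ===== PRECONDITION & SPEC =====
def Spec_is_a_valid_message (message : String) (out : Bool) : Prop := out = is_a_valid_message_alt message
instance (message : String) (out : Bool) : Decidable (Spec_is_a_valid_message message out) := by unfold Spec_is_a_valid_message; infer_instance

-- ===== CLAIM (what is proved, stated in full; the proofs are below) =====
def Claim_equal_is_a_valid_message : Prop := ∀ (message : String), Dom_is_a_valid_message message → Spec_is_a_valid_message message (is_a_valid_message message)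

-- ===== LEMMAS AND PROOFS =====

-- a character classified as a digit is never an alpha (ASCII ranges are disjoint)
lemma pv_digit_not_alpha (c : Char) (h : PySem.Chars.isdigit c = true) :
    PySem.Chars.isalpha c = false := by
  simp [PySem.Chars.isdigit] at h
  simp [PySem.Chars.isalpha, PySem.Chars.isupper, PySem.Chars.islower]
  refine ⟨fun h1 => ?_, fun h1 => ?_⟩
  · exact absurd (le_trans h1 h.2) (by decide)
  · exact absurd (le_trans h1 h.2) (by decide)

lemma pv_classify_eq_d (x : Char) : (pvClassify x == 'd') = PySem.Chars.isdigit x := by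
  unfold pvClassify
  split_ifs with h1 h2 <;> simp_all

lemma pv_classify_eq_a (x : Char) : (pvClassify x == 'a') = PySem.Chars.isalpha x := by
  unfold pvClassify
  by_cases h1 : PySem.Chars.isdigit x = true
  · simp [h1, pv_digit_not_alpha x h1]
  · by_cases h2 : PySem.Chars.isalpha x = true <;> simp [h1, h2]

lemma pv_dropWhile_head_false (p : Char → Bool) :
    ∀ (l : List Char) (r : Char) (t' : List Char), l.dropWhile p = r :: t' → p r = false := by
  intro l
  induction l with
  | nil => intro r t' h; simp at h
  | cons a l ih =>
    intro r t' h
    by_cases hp : p a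
    · rw [List.dropWhile_cons_of_pos hp] at h; exact ih r t' h
    · rw [List.dropWhile_cons_of_neg hp] at h
      cases h; simpa using hp

lemma pv_walk_tokenize : ∀ (n : Nat) (cs : List Char), cs.length ≤ n →
    pvWalk (pvTokenize cs) = pvLoopA cs := by
  intro n
  induction n with
  | zero =>
    intro cs hlen
    have : cs = [] := List.length_eq_zero_iff.mp (Nat.le_zero.mp hlen)
    subst this
    simp [pvTokenize, pvWalk, pvLoopA]
  | succ n ih =>
    intro cs hlen
    match cs with
    | [] => simp [pvTokenize, pvWalk, pvLoopA]
    | c :: t =>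
      have hlt : t.length ≤ n := by simpa using hlen
      by_cases hd : PySem.Chars.isdigit c = true
      · -- head is a digit: both sides read the digit run c :: t.takeWhile isdigit
        have hpred : (fun d => pvClassify d == pvClassify c) = PySem.Chars.isdigit := by
          funext x
          rw [show pvClassify c = 'd' from by simp [pvClassify, hd]]
          exact pv_classify_eq_d x
        have htok : pvTokenize (c :: t) =
            ('d', c :: t.takeWhile PySem.Chars.isdigit) ::
              pvTokenize (t.dropWhile PySem.Chars.isdigit) := by
          rw [pvTokenize]
          simp only [hpred]
          rw [show pvClassify c = 'd' from by simp [pvClassify, hd]]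
        have hloop : pvLoopA (c :: t) =
            (if ((t.dropWhile PySem.Chars.isdigit).takeWhile PySem.Chars.isalpha).length ≠
                  (pvPyInt (c :: t.takeWhile PySem.Chars.isdigit) : Int) then false
             else pvLoopA ((t.dropWhile PySem.Chars.isdigit).dropWhile PySem.Chars.isalpha)) := by
          rw [pvLoopA]
          simp [List.takeWhile_cons_of_pos hd, List.dropWhile_cons_of_pos hd]
        rw [htok, hloop]
        cases hrest : t.dropWhile PySem.Chars.isdigit with
        | nil =>
          rw [show pvTokenize ([] : List Char) = [] from by rw [pvTokenize]]
          rw [pvWalk]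
          by_cases h0 : pvPyInt (c :: t.takeWhile PySem.Chars.isdigit) = 0 <;>
            simp [pvLoopA, h0, eq_comm]
        | cons r t' =>
          have hrd : PySem.Chars.isdigit r = false := pv_dropWhile_head_false _ t r t' hrest
          have hrlen : t'.length < t.length := by
            have := List.length_dropWhile_le PySem.Chars.isdigit t
            rw [hrest] at this
            simpa using this
          by_cases ha : PySem.Chars.isalpha r = true
          · -- next run is an alpha run
            have hpreda : (fun d => pvClassify d == pvClassify r) = PySem.Chars.isalpha := by
              funext x
              rw [show pvClassify r = 'a' from by simp [pvClassify, hrd, ha]]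
              exact pv_classify_eq_a x
            have htok2 : pvTokenize (r :: t') =
                ('a', r :: t'.takeWhile PySem.Chars.isalpha) ::
                  pvTokenize (t'.dropWhile PySem.Chars.isalpha) := by
              rw [pvTokenize]
              simp only [hpreda]
              rw [show pvClassify r = 'a' from by simp [pvClassify, hrd, ha]]
            rw [htok2, pvWalk]
            simp only [List.takeWhile_cons_of_pos ha, List.dropWhile_cons_of_pos ha]
            have hih := ih (t'.dropWhile PySem.Chars.isalpha)
              (le_trans (List.length_dropWhile_le _ t') (le_trans (Nat.le_of_lt hrlen) hlt))
            by_cases hn : ((r :: t'.takeWhile PySem.Chars.isalpha).length : Int) =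
                pvPyInt (c :: t.takeWhile PySem.Chars.isdigit) <;>
              simp at hn <;> simp [hn, hih]
          · -- next run is an 'other' run: both sides reject
            have ha' : PySem.Chars.isalpha r = false := by simpa using ha
            have htok2 : pvTokenize (r :: t') =
                ('x', r :: t'.takeWhile (fun d => pvClassify d == 'x')) ::
                  pvTokenize (t'.dropWhile (fun d => pvClassify d == 'x')) := by
              rw [pvTokenize]
              rw [show pvClassify r = 'x' from by simp [pvClassify, hrd, ha']]
            rw [htok2, pvWalk]
            simp only [List.takeWhile_cons_of_neg (by simp [ha'] : ¬ PySem.Chars.isalpha r = true),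
              List.dropWhile_cons_of_neg (by simp [ha'] : ¬ PySem.Chars.isalpha r = true)]
            rw [pvLoopA]
            simp [List.takeWhile_cons_of_neg (by simp [hrd] : ¬ PySem.Chars.isdigit r = true), pvWalk]
      · -- head is not a digit: A finds an empty digit run, B a non-digit first run
        rw [pvTokenize, pvWalk, pvLoopA]
        have hcl : pvClassify c ≠ 'd' := by
          by_cases ha : PySem.Chars.isalpha c = true <;> simp [pvClassify, hd, ha]
        simp [List.takeWhile_cons_of_neg hd, hcl]

-- ===== VERDICT (by name: the statement is the Claim_ definition above) =====
theorem is_a_valid_message_spec : Claim_equal_is_a_valid_message := by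
  intro message _
  unfold Spec_is_a_valid_message is_a_valid_message is_a_valid_message_alt
  exact (pv_walk_tokenize message.toList.length message.toList le_rfl).symm
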